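-- pv_equiv track=rewrite | github.com/iceout/aidd-plugin | skills/aidd-core/runtime/prd_review_gate.py | parse_review_section
-- ===== SOURCE A (Python) =====
-- REVIEW_HEADER = "## PRD Review"
--
-- def parse_review_section(content: str) -> tuple[bool, str, list[str]]:
--     inside = False
--     found = False
--     status = ""
--     action_items: list[str] = []
--     for raw in content.splitlines():
--         stripped = raw.strip()
--         if stripped.startswith("## "):
--             inside = stripped == REVIEW_HEADER
--             if inside:
--                 found = True
--             continue
--         if not inside:
--             continue
--         lower = stripped.lower()
--         if lower.startswith("status:"):
--             status = stripped.split(":", 1)[1].strip().lower()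
--         elif stripped.startswith("- ["):
--             action_items.append(stripped)
--     return found, status, action_items
-- ===== SOURCE B (Python) =====
-- REVIEW_HEADER = "## PRD Review"
--
-- def parse_review_section(content: str) -> tuple[bool, str, list[str]]:
--     # Pass 1: group lines into (header, stripped-body-lines) sections.
--     sections: list[tuple[str, list[str]]] = []
--     cur = None
--     for raw in content.splitlines():
--         stripped = raw.strip()
--         if stripped.startswith("## "):
--             if cur is not None:
--                 sections.append(cur)
--             cur = (stripped, [])
--         elif cur is not None:
--             cur[1].append(stripped)
--     if cur is not None:
--         sections.append(cur)
--     # Pass 2: accumulate over every PRD Review section.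
--     found = False
--     status = ""
--     action_items: list[str] = []
--     for header, lines in sections:
--         if header == REVIEW_HEADER:
--             found = True
--             for s in lines:
--                 if s.lower().startswith("status:"):
--                     status = s.split(":", 1)[1].strip().lower()
--                 elif s.startswith("- ["):
--                     action_items.append(s)
--     return found, status, action_items
-- ===== Notes on version B (the rewrite author's own statement) =====
-- stated objective: alternative
-- what changed: Replaces A's single fused scan with an inside-flag by a two-pass decomposition: first group lines into (header, body-lines) sections, then fold over the sections whose header matches REVIEW_HEADER, preserving multi-section accumulation and last-status-wins.
import Mathlib
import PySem

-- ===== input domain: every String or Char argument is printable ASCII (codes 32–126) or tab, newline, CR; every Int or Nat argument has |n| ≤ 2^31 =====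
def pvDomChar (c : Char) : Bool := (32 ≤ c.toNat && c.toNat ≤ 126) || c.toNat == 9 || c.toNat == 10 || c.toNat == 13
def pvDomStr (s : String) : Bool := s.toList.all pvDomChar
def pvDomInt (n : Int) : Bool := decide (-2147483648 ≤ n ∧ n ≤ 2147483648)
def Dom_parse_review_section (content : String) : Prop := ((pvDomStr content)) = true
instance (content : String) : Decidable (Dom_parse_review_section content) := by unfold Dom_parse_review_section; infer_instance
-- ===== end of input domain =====

-- B re-decomposes A's fused flag-driven scan into two passes (group lines into sections, then fold over the
-- matching sections); same linear cost, objective: alternative decomposition.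

def pvReviewHeader : String := "## PRD Review"

-- ===== PORT A =====
-- A's loop body; the guarded split(":",1)[1] is ported with pyGetD: the "status:" guard ensures index 1 exists.
def pvStepA (st : Bool × Bool × String × List String) (raw : String) : Bool × Bool × String × List String :=
  let stripped := PySem.Str.strip raw
  if PySem.Str.startswith stripped "## " then
    (stripped == pvReviewHeader,
     (if stripped == pvReviewHeader then true else st.2.1), st.2.2.1, st.2.2.2)
  else if !st.1 then st
  else
    let lower := PySem.Str.lower stripped
    if PySem.Str.startswith lower "status:" then
      (st.1, st.2.1,
       PySem.Str.lower (PySem.Str.strip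
         (PySem.List.pyGetD ((PySem.Str.splitMax? stripped ":" 1).getD []) 1 "")),
       st.2.2.2)
    else if PySem.Str.startswith stripped "- [" then
      (st.1, st.2.1, st.2.2.1, st.2.2.2 ++ [stripped])
    else st

def parse_review_section (content : String) : Bool × String × List String :=
  ((PySem.Str.splitlines content).foldl pvStepA (false, false, "", [])).2

-- ===== PORT B =====
-- pass 1 step: start a new section on a header line, else append to the open section
def pvGroupStep (acc : List (String × List String) × Option (String × List String)) (raw : String) :
    List (String × List String) × Option (String × List String) :=
  let stripped := PySem.Str.strip raw
  if PySem.Str.startswith stripped "## " then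
    (acc.1 ++ acc.2.toList, some (stripped, []))
  else
    match acc.2 with
    | some (h, ls) => (acc.1, some (h, ls ++ [stripped]))
    | none => acc

-- pass 2 inner step over a matching section's (already stripped) lines
def pvInner (st : String × List String) (s : String) : String × List String :=
  if PySem.Str.startswith (PySem.Str.lower s) "status:" then
    (PySem.Str.lower (PySem.Str.strip
       (PySem.List.pyGetD ((PySem.Str.splitMax? s ":" 1).getD []) 1 "")), st.2)
  else if PySem.Str.startswith s "- [" then (st.1, st.2 ++ [s])
  else st

-- pass 2 outer step over sections
def pvProcSec (st : Bool × String × List String) (sec : String × List String) :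
    Bool × String × List String :=
  if sec.1 == pvReviewHeader then
    let r := sec.2.foldl pvInner (st.2.1, st.2.2)
    (true, r.1, r.2)
  else st

def parse_review_section_alt (content : String) : Bool × String × List String :=
  let g := (PySem.Str.splitlines content).foldl pvGroupStep ([], none)
  (g.1 ++ g.2.toList).foldl pvProcSec (false, "", [])

-- ===== PRECONDITION & SPEC =====
def Spec_parse_review_section (content : String) (out : Bool × String × List String) : Prop := out = parse_review_section_alt content
instance (content : String) (out : Bool × String × List String) : Decidable (Spec_parse_review_section content out) := by unfold Spec_parse_review_section; infer_instance

-- ===== CLAIM (what is proved, stated in full; the proofs are below) =====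
def Claim_equal_parse_review_section : Prop := ∀ (content : String), Dom_parse_review_section content → Spec_parse_review_section content (parse_review_section content)

-- ===== LEMMAS AND PROOFS =====

-- the sections still to be produced from the remaining lines, given the open section `cur`
def pvSecsR (cur : Option (String × List String)) : List String → List (String × List String)
  | [] => cur.toList
  | raw :: rest =>
    let stripped := PySem.Str.strip raw
    if PySem.Str.startswith stripped "## " then
      cur.toList ++ pvSecsR (some (stripped, [])) rest
    else
      pvSecsR (cur.map fun p => (p.1, p.2 ++ [stripped])) rest

-- pass 1 produces exactly pvSecsR
theorem pvGroup_eq_secsR (lines : List String) :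
    ∀ (done : List (String × List String)) (cur : Option (String × List String)),
      (lines.foldl pvGroupStep (done, cur)).1 ++ (lines.foldl pvGroupStep (done, cur)).2.toList
        = done ++ pvSecsR cur lines := by
  induction lines with
  | nil => intro done cur; simp [pvSecsR]
  | cons raw rest ih =>
    intro done cur
    simp only [List.foldl_cons]
    by_cases h : PySem.Str.startswith (PySem.Str.strip raw) "## " = true
    · rw [show pvGroupStep (done, cur) raw = (done ++ cur.toList, some (PySem.Str.strip raw, []))
          by simp only [pvGroupStep, h, if_true]]
      rw [ih, pvSecsR]
      simp only [h, if_true, List.append_assoc]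
    · have hstep : pvGroupStep (done, cur) raw
          = (done, cur.map fun p => (p.1, p.2 ++ [PySem.Str.strip raw])) := by
        cases cur with
        | none => simp only [pvGroupStep, h, Bool.false_eq_true, if_false, Option.map_none]
        | some p => cases p; simp only [pvGroupStep, h, Bool.false_eq_true, if_false, Option.map_some]
      rw [hstep, ih, pvSecsR]
      simp only [h, Bool.false_eq_true, if_false]

def pvInsideOf (cur : Option (String × List String)) : Bool :=
  match cur with
  | some (h, _) => h == pvReviewHeader
  | none => false

def pvAbsorb (st : Bool × String × List String) (cur : Option (String × List String)) :
    Bool × String × List String :=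
  match cur with
  | some sec => pvProcSec st sec
  | none => st

-- main invariant: A's fused loop from the state corresponding to open section `cur`
-- equals B's section fold over the sections the remaining lines produce
theorem pvMain (lines : List String) :
    ∀ (cur : Option (String × List String)) (f : Bool) (s : String) (it : List String),
      (lines.foldl pvStepA (pvInsideOf cur, pvAbsorb (f, s, it) cur)).2
        = (pvSecsR cur lines).foldl pvProcSec (f, s, it) := by
  induction lines with
  | nil =>
    intro cur f s it
    cases cur with
    | none => simp [pvSecsR, pvAbsorb]
    | some sec => simp [pvSecsR, pvAbsorb]
  | cons raw rest ih =>
    intro cur f s it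
    simp only [List.foldl_cons]
    rw [pvSecsR]
    by_cases h : PySem.Str.startswith (PySem.Str.strip raw) "## " = true
    · -- header line: close current section, open a new one
      have h1 : pvStepA (pvInsideOf cur, pvAbsorb (f, s, it) cur) raw
          = (pvInsideOf (some (PySem.Str.strip raw, [])),
             pvAbsorb (pvAbsorb (f, s, it) cur) (some (PySem.Str.strip raw, []))) := by
        by_cases hr : (PySem.Str.strip raw == pvReviewHeader) = true
        · simp only [pvStepA, pvInsideOf, pvAbsorb, pvProcSec, h, if_true, hr, List.foldl_nil]
        · simp only [pvStepA, pvInsideOf, pvAbsorb, pvProcSec, h, if_true, hr, if_false,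
            Bool.false_eq_true]
      rw [h1, ih]
      simp only [h, if_true, List.foldl_append]
      cases cur with
      | none => simp [pvAbsorb]
      | some sec => simp [pvAbsorb]
    · -- body line: it joins the open section (if any)
      simp only [h, Bool.false_eq_true, if_false]
      have h1 : pvStepA (pvInsideOf cur, pvAbsorb (f, s, it) cur) raw
          = (pvInsideOf (cur.map fun p => (p.1, p.2 ++ [PySem.Str.strip raw])),
             pvAbsorb (f, s, it) (cur.map fun p => (p.1, p.2 ++ [PySem.Str.strip raw]))) := by
        cases cur with
        | none =>
          simp only [pvStepA, pvInsideOf, pvAbsorb, h, Bool.false_eq_true, if_false,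
            Option.map_none, Bool.not_false, if_true]
        | some sec =>
          rcases sec with ⟨hd, ls⟩
          by_cases hr : (hd == pvReviewHeader) = true
          · simp only [pvStepA, pvInsideOf, pvAbsorb, pvProcSec, hr, if_true, h, if_false,
              Option.map_some, List.foldl_append, List.foldl_cons, List.foldl_nil,
              Bool.not_true, Bool.false_eq_true, pvInner]
            split_ifs <;> rfl
          · simp only [pvStepA, pvInsideOf, pvAbsorb, pvProcSec, hr, h, if_false,
              Option.map_some, Bool.not_false, if_true, Bool.false_eq_true]
      rw [h1, ih]

-- ===== VERDICT (by name: the statement is the Claim_ definition above) =====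
theorem parse_review_section_spec : Claim_equal_parse_review_section := by
  intro content _
  unfold Spec_parse_review_section parse_review_section
  have hm := pvMain (PySem.Str.splitlines content) none false "" []
  simp only [pvInsideOf, pvAbsorb] at hm
  rw [hm]
  have hg := pvGroup_eq_secsR (PySem.Str.splitlines content) [] none
  simp only [List.nil_append] at hg
  show List.foldl pvProcSec (false, "", []) (pvSecsR none (PySem.Str.splitlines content))
      = List.foldl pvProcSec (false, "", [])
          ((List.foldl pvGroupStep ([], none) (PySem.Str.splitlines content)).1
            ++ (List.foldl pvGroupStep ([], none) (PySem.Str.splitlines content)).2.toList)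
  rw [hg]
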